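-- pv_equiv track=rewrite | github.com/starkworld/Online-Assessments | Citadel/BeforeToAfterMatrix.py | findBeforeMatrices
-- ===== SOURCE A (Python) =====
-- def findBeforeMatrices(after):  # function
--     row = len(after)  # find number of rows
--     col = len(after[0])  # find number of columns in each row
--     before = after  # initialize before as after
--     for i in range(row):  # iterate over the rows and columns of after matrix
--         for j in range(col):
--             s = after[i][j]  # initialize s as after[i][j]
--             for k in range(0, i + 1):  # iterate over the after matrix for rows in range 0 to i(inclusive)
--                 # and columns in range 0 to j(inclusive)
--                 for l in range(0, j + 1):
--                     if k == i and l == j:  # if k value matches i value and j value matches l, then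
--                         # the value need not be subtracted from s (as we see in the formulas)
--                         pass
--                     else:  # otherwise subtract the value from s
--                         s = s - after[k][l]
--             before[i][j] = s  # assign the value remaining in s to before matrix
--     return before  # return the before matrix
-- ===== SOURCE B (Python) =====
-- def findBeforeMatrices(after):
--     # 2D difference of the original matrix (return value only; unlike A, does not mutate `after`)
--     before = []
--     prev = [0] * len(after[0])
--     for row in after:
--         new = []
--         left = up_left = 0
--         for x, up in zip(row, prev):
--             new.append(x - left - up + up_left)
--             left, up_left = x, up
--         before.append(new)
--         prev = row
--     return before
-- ===== Notes on version B (the rewrite author's own statement) =====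
-- stated objective: faster
-- what changed: Replaces A's quadruple loop (re-subtracting the whole processed rectangle for every cell) by a single pass computing the 2D difference B[i][j]=A[i][j]-A[i-1][j]-A[i][j-1]+A[i-1][j-1] of the original values; B does not mutate the argument (A does), the return value is identical.
-- outside the precondition, e.g. on findBeforeMatrices([[1], [2, 3]]): A returns [[1], [1, 3]], B returns [[1], [1]]
import Mathlib
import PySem

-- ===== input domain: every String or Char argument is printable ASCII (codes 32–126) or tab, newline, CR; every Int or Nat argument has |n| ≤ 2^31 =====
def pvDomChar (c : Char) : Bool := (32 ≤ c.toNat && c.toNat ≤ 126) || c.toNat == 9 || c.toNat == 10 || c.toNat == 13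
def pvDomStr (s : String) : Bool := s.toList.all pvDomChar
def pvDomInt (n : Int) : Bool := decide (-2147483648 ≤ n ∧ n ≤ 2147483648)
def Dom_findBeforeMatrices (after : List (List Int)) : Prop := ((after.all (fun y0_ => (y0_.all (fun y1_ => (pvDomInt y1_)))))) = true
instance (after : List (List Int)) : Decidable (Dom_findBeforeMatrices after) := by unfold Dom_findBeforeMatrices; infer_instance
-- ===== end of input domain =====

-- B replaces A's quadruple loop by a single pass computing the 2D difference of the original
-- values (asymptotically faster); A mutates `after` in place, B does not — the equivalence
-- proved is about the return value only.

-- ===== PORT A =====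
-- after[k][l] read/written on in-range indices only under Pre_; getD/modify/set are exact there.
def pyGet2 (m : List (List Int)) (k l : Nat) : Int := (m.getD k []).getD l 0

-- s = after[i][j]; the two inner loops subtracting after[k][l] for (k,l) ≤ (i,j), (k,l) ≠ (i,j)
def cellVal (m : List (List Int)) (i j : Nat) : Int :=
  (List.range (i+1)).foldl (fun s k =>
    (List.range (j+1)).foldl (fun s l =>
      if k = i ∧ l = j then s else s - pyGet2 m k l) s) (pyGet2 m i j)

-- before[i][j] = s  (before aliases after, so later reads see the new value)
def cellStep (i : Nat) (m : List (List Int)) (j : Nat) : List (List Int) :=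
  m.modify i (fun r => r.set j (cellVal m i j))

def rowStep (col : Nat) (m : List (List Int)) (i : Nat) : List (List Int) :=
  (List.range col).foldl (cellStep i) m

def findBeforeMatrices (after : List (List Int)) : List (List Int) :=
  (List.range after.length).foldl (rowStep (after.getD 0 []).length) after

-- ===== PORT B =====
-- one row of the 2D difference, zipping the row with the previous row
def diffRow (prev r : List Int) (left upLeft : Int) : List Int :=
  match prev, r with
  | up :: ups, x :: xs => (x - left - up + upLeft) :: diffRow ups xs x up
  | _, _ => []

def goRows (prev : List Int) : List (List Int) → List (List Int)
  | [] => []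
  | r :: rs => diffRow prev r 0 0 :: goRows r rs

def findBeforeMatrices_alt (after : List (List Int)) : List (List Int) :=
  goRows (List.replicate (after.getD 0 []).length 0) after

-- ===== PRECONDITION & SPEC =====
-- Pre_ excludes the empty matrix (A raises IndexError on after[0]) and ragged inputs: with a
-- row shorter than the first A raises IndexError, and with longer rows A's leaving the columns
-- beyond len(after[0]) untouched is an artefact of its implementation.
def Pre_findBeforeMatrices (after : List (List Int)) : Prop :=
  after ≠ [] ∧ ∀ r ∈ after, r.length = (after.getD 0 []).length
instance (after : List (List Int)) : Decidable (Pre_findBeforeMatrices after) := by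
  unfold Pre_findBeforeMatrices; infer_instance

def pvWitness_findBeforeMatrices : List (List Int) := [[1, 3], [3, 7]]

def Spec_findBeforeMatrices (after : List (List Int)) (out : List (List Int)) : Prop :=
  out = findBeforeMatrices_alt after
instance (after : List (List Int)) (out : List (List Int)) : Decidable (Spec_findBeforeMatrices after out) := by
  unfold Spec_findBeforeMatrices; infer_instance

-- ===== CLAIM (what is proved, stated in full; the proofs are below) =====
def Claim_equal_findBeforeMatrices : Prop := ∀ (after : List (List Int)), Dom_findBeforeMatrices after → Pre_findBeforeMatrices after → Spec_findBeforeMatrices after (findBeforeMatrices after)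

-- ===== LEMMAS AND PROOFS =====

-- the 2D difference of the original matrix (0 outside the matrix via getD)
def Dent (a : List (List Int)) (i j : Nat) : Int :=
  pyGet2 a i j - (if i = 0 then 0 else pyGet2 a (i-1) j)
    - (if j = 0 then 0 else pyGet2 a i (j-1))
    + (if i = 0 then 0 else if j = 0 then 0 else pyGet2 a (i-1) (j-1))

-- invariant for A's row-major sweep: cells before (i,j) hold Dent, the rest the original values
def goodM (a m : List (List Int)) (i j : Nat) : Prop :=
  m.length = a.length ∧
  (∀ k, k < a.length → (m.getD k []).length = (a.getD k []).length) ∧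
  (∀ k l, k < a.length → l < (a.getD 0 []).length →
    pyGet2 m k l = if k < i ∨ (k = i ∧ l < j) then Dent a k l else pyGet2 a k l)

theorem tele (f : Nat → Int) : ∀ j, (∑ l ∈ Finset.range (j+1), (f l - if l = 0 then 0 else f (l-1))) = f j := by
  intro j
  induction j with
  | zero => simp
  | succ j ih => rw [Finset.sum_range_succ, ih]; simp

theorem sumD (a : List (List Int)) (i j : Nat) :
    (∑ k ∈ Finset.range (i+1), ∑ l ∈ Finset.range (j+1), Dent a k l) = pyGet2 a i j := by
  have inner : ∀ k, (∑ l ∈ Finset.range (j+1), Dent a k l)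
      = ((fun k => pyGet2 a k j) k - if k = 0 then 0 else (fun k => pyGet2 a k j) (k-1)) := by
    intro k
    by_cases hk : k = 0
    · subst hk
      have h := tele (fun l => pyGet2 a 0 l) j
      simp only [Dent, if_pos rfl]
      simpa using h
    · have h := tele (fun l => pyGet2 a k l - pyGet2 a (k-1) l) j
      rw [show (∑ l ∈ Finset.range (j+1), Dent a k l)
          = ∑ l ∈ Finset.range (j+1), ((fun l => pyGet2 a k l - pyGet2 a (k-1) l) l
              - if l = 0 then 0 else (fun l => pyGet2 a k l - pyGet2 a (k-1) l) (l-1)) from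
        Finset.sum_congr rfl (by intro l _; by_cases hl : l = 0 <;> simp [Dent, hk, hl] <;> ring)]
      rw [h]; simp [hk]
  rw [Finset.sum_congr rfl (fun k _ => inner k)]
  simpa using tele (fun k => pyGet2 a k j) i

theorem foldl_sub (w : Nat → Int) (s : Int) (n : Nat) :
    (List.range n).foldl (fun s k => s - w k) s = s - ∑ k ∈ Finset.range n, w k := by
  induction n generalizing s with
  | zero => simp
  | succ n ih => rw [List.range_succ, List.foldl_append, ih, Finset.sum_range_succ]; simp; ring

theorem cellVal_sum (m : List (List Int)) (i j : Nat) :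
    cellVal m i j = pyGet2 m i j
      - ∑ k ∈ Finset.range (i+1), ∑ l ∈ Finset.range (j+1),
          (if k = i ∧ l = j then 0 else pyGet2 m k l) := by
  unfold cellVal
  have h1 : ∀ k : Nat, (fun (s : Int) (l : Nat) => if k = i ∧ l = j then s else s - pyGet2 m k l)
      = (fun s l => s - (if k = i ∧ l = j then 0 else pyGet2 m k l)) := by
    intro k; funext s l; split_ifs <;> ring
  have h2 : (fun (s : Int) (k : Nat) => (List.range (j+1)).foldl
        (fun s l => if k = i ∧ l = j then s else s - pyGet2 m k l) s)
      = (fun s k => s - ∑ l ∈ Finset.range (j+1), (if k = i ∧ l = j then 0 else pyGet2 m k l)) := by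
    funext s k
    rw [h1 k, foldl_sub]
  rw [h2, foldl_sub]

theorem cellVal_eq (a m : List (List Int)) (i j : Nat)
    (hi : i < a.length) (hj : j < (a.getD 0 []).length)
    (hm : goodM a m i j) : cellVal m i j = Dent a i j := by
  obtain ⟨hlen, hrows, hent⟩ := hm
  rw [cellVal_sum]
  have hij : pyGet2 m i j = pyGet2 a i j := by
    rw [hent i j hi hj]; simp
  have hsum : (∑ k ∈ Finset.range (i+1), ∑ l ∈ Finset.range (j+1),
        (if k = i ∧ l = j then 0 else pyGet2 m k l))
      = ∑ k ∈ Finset.range (i+1), ∑ l ∈ Finset.range (j+1),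
        (Dent a k l - (if k = i then (if l = j then Dent a k l else 0) else 0)) := by
    refine Finset.sum_congr rfl (fun k hk => Finset.sum_congr rfl (fun l hl => ?_))
    rw [Finset.mem_range] at hk hl
    by_cases h : k = i ∧ l = j
    · simp [h]
    · have hproc : k < i ∨ (k = i ∧ l < j) := by omega
      have := hent k l (by omega) (by omega)
      rw [if_pos hproc] at this
      have h2 : ¬(k = i ∧ l = j) := h
      simp only [if_neg h2, this]
      rcases Nat.lt_or_ge k i with hki | hki
      · simp [show k ≠ i from by omega]
      · have hke : k = i := by omega
        have hlj : l ≠ j := by omega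
        simp [hke, hlj]
  rw [hij, hsum]
  simp only [Finset.sum_sub_distrib, sumD]
  have hin : ∀ k, (∑ l ∈ Finset.range (j+1), (if k = i then (if l = j then Dent a k l else 0) else 0))
      = if k = i then Dent a k j else 0 := by
    intro k; by_cases hk : k = i
    · simp [hk, Finset.sum_ite_eq']
    · simp [hk]
  rw [Finset.sum_congr rfl (fun k _ => hin k),
    Finset.sum_ite_eq' (Finset.range (i+1)) i (fun k => Dent a k j)]
  simp

theorem getD_modify_ne {α : Type} (d : α) (f : α → α) {i k : Nat} (h : i ≠ k) (l : List α) :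
    (l.modify i f).getD k d = l.getD k d := by
  simp [List.getD_eq_getElem?_getD, List.getElem?_modify, h]

theorem getD_modify_self {α : Type} (d : α) (f : α → α) {i : Nat} (l : List α) (h : i < l.length) :
    (l.modify i f).getD i d = f (l.getD i d) := by
  simp [List.getD_eq_getElem?_getD, List.getElem?_modify, List.getElem?_eq_getElem h]

theorem getD_set_self {α : Type} (d : α) {j : Nat} {v : α} (l : List α) (h : j < l.length) :
    (l.set j v).getD j d = v := by
  simp [List.getD_eq_getElem?_getD, List.getElem?_set, h]

theorem getD_set_ne {α : Type} (d : α) {j k : Nat} {v : α} (h : j ≠ k) (l : List α) :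
    (l.set j v).getD k d = l.getD k d := by
  simp [List.getD_eq_getElem?_getD, List.getElem?_set, h]

theorem rowlen (a : List (List Int)) (hrect : ∀ r ∈ a, r.length = (a.getD 0 []).length)
    {k : Nat} (hk : k < a.length) : (a.getD k []).length = (a.getD 0 []).length := by
  rw [List.getD_eq_getElem _ _ hk]
  exact hrect _ (List.getElem_mem hk)

theorem cellStep_good (a m : List (List Int)) (i j : Nat)
    (hrect : ∀ r ∈ a, r.length = (a.getD 0 []).length)
    (hi : i < a.length) (hj : j < (a.getD 0 []).length)
    (hm : goodM a m i j) : goodM a (cellStep i m j) i (j+1) := by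
  have hv := cellVal_eq a m i j hi hj hm
  obtain ⟨hlen, hrows, hent⟩ := hm
  have him : i < m.length := by omega
  have hjrow : j < (m.getD i []).length := by
    rw [hrows i hi, rowlen a hrect hi]; exact hj
  refine ⟨by simp [cellStep, hlen], ?_, ?_⟩
  · intro k hk
    by_cases hki : i = k
    · subst hki
      rw [cellStep, getD_modify_self _ _ _ him]
      rw [List.length_set]; exact hrows i hk
    · rw [cellStep, getD_modify_ne _ _ hki]
      exact hrows k hk
  · intro k l hk hl
    by_cases hki : i = k
    · subst hki
      rw [pyGet2, cellStep, getD_modify_self _ _ _ him]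
      by_cases hlj : j = l
      · subst hlj
        rw [getD_set_self _ _ hjrow, hv]
        simp
      · rw [getD_set_ne _ hlj]
        have := hent i l hk hl
        rw [pyGet2] at this
        rw [this]
        have : (i < i ∨ i = i ∧ l < j) ↔ (i < i ∨ i = i ∧ l < j + 1) := by omega
        split_ifs with h1 h2 <;> first | rfl | (exfalso; omega)
    · rw [pyGet2, cellStep, getD_modify_ne _ _ hki]
      have := hent k l hk hl
      rw [pyGet2] at this
      rw [this]
      split_ifs with h1 h2 <;> first | rfl | (exfalso; omega)

theorem goodM_shift (a m : List (List Int)) (i : Nat)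
    (hm : goodM a m i (a.getD 0 []).length) : goodM a m (i+1) 0 := by
  obtain ⟨hlen, hrows, hent⟩ := hm
  refine ⟨hlen, hrows, ?_⟩
  intro k l hk hl
  rw [hent k l hk hl]
  split_ifs with h1 h2 <;> first | rfl | (exfalso; omega)

theorem rowStep_good (a m : List (List Int)) (i : Nat)
    (hrect : ∀ r ∈ a, r.length = (a.getD 0 []).length)
    (hi : i < a.length)
    (hm : goodM a m i 0) : goodM a (rowStep (a.getD 0 []).length m i) (i+1) 0 := by
  apply goodM_shift
  rw [rowStep]
  have : ∀ j, j ≤ (a.getD 0 []).length →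
      goodM a ((List.range j).foldl (cellStep i) m) i j := by
    intro j
    induction j with
    | zero => intro _; simpa using hm
    | succ j ih =>
      intro hje
      rw [List.range_succ, List.foldl_append]
      exact cellStep_good a _ i j hrect hi (by omega) (ih (by omega))
  exact this _ le_rfl

theorem sweep_good (a : List (List Int))
    (hrect : ∀ r ∈ a, r.length = (a.getD 0 []).length) :
    goodM a (findBeforeMatrices a) a.length 0 := by
  rw [findBeforeMatrices]
  have : ∀ i, i ≤ a.length →
      goodM a ((List.range i).foldl (rowStep (a.getD 0 []).length) a) i 0 := by
    intro i
    induction i with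
    | zero =>
      intro _
      refine ⟨rfl, fun k _ => rfl, fun k l hk hl => ?_⟩
      simp
    | succ i ih =>
      intro hie
      rw [List.range_succ, List.foldl_append]
      exact rowStep_good a _ i hrect (by omega) (ih (by omega))
  exact this _ le_rfl

theorem diffRow_len (prev : List Int) : ∀ (r : List Int) (left upLeft : Int),
    (diffRow prev r left upLeft).length = min prev.length r.length := by
  induction prev with
  | nil => intro r left upLeft; cases r <;> simp [diffRow]
  | cons up ups ih =>
    intro r left upLeft
    cases r with
    | nil => simp [diffRow]
    | cons x xs => simp only [diffRow, List.length_cons, ih]; omega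

theorem diffRow_getD (prev : List Int) : ∀ (r : List Int) (left upLeft : Int) (j : Nat),
    j < min prev.length r.length →
    (diffRow prev r left upLeft).getD j 0 =
      r.getD j 0 - (if j = 0 then left else r.getD (j-1) 0)
        - prev.getD j 0 + (if j = 0 then upLeft else prev.getD (j-1) 0) := by
  induction prev with
  | nil => intro r left upLeft j h; simp at h
  | cons up ups ih =>
    intro r left upLeft j h
    cases r with
    | nil => simp at h
    | cons x xs =>
      cases j with
      | zero => simp [diffRow]
      | succ j =>
        simp only [diffRow, List.getD_cons_succ]
        rw [ih xs x up j (by simp at h ⊢; omega)]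
        cases j with
        | zero => simp
        | succ j => simp

theorem goRows_getD (rows : List (List Int)) : ∀ (prev : List Int) (i : Nat), i < rows.length →
    (goRows prev rows).getD i [] =
      diffRow (if i = 0 then prev else rows.getD (i-1) []) (rows.getD i []) 0 0 := by
  induction rows with
  | nil => intro prev i h; simp at h
  | cons r rs ih =>
    intro prev i h
    cases i with
    | zero => simp [goRows]
    | succ i =>
      simp only [goRows, List.getD_cons_succ]
      rw [ih r i (by simp at h; omega)]
      cases i with
      | zero => simp
      | succ i => simp

theorem goRows_len (rows : List (List Int)) : ∀ prev, (goRows prev rows).length = rows.length := by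
  induction rows with
  | nil => intro prev; simp [goRows]
  | cons r rs ih => intro prev; simp [goRows, ih]

theorem alt_entry (a : List (List Int))
    (hrect : ∀ r ∈ a, r.length = (a.getD 0 []).length)
    {i j : Nat} (hi : i < a.length) (hj : j < (a.getD 0 []).length) :
    pyGet2 (findBeforeMatrices_alt a) i j = Dent a i j := by
  rw [pyGet2, findBeforeMatrices_alt, goRows_getD a _ i hi]
  have hprevlen : (if i = 0 then List.replicate (a.getD 0 []).length (0:Int) else a.getD (i-1) []).length
      = (a.getD 0 []).length := by
    split_ifs with h0
    · simp
    · exact rowlen a hrect (by omega)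
  rw [diffRow_getD _ _ _ _ j (by rw [hprevlen, rowlen a hrect hi]; omega)]
  rw [Dent]
  have hup : (if i = 0 then List.replicate (a.getD 0 []).length (0:Int) else a.getD (i-1) []).getD j 0
      = (if i = 0 then 0 else pyGet2 a (i-1) j) := by
    split_ifs with h0
    · rw [List.getD_eq_getElem?_getD, List.getElem?_replicate, if_pos (by omega)]; rfl
    · rfl
  have hupl : (if j = 0 then (0:Int) else (if i = 0 then List.replicate (a.getD 0 []).length (0:Int) else a.getD (i-1) []).getD (j-1) 0)
      = (if i = 0 then 0 else if j = 0 then 0 else pyGet2 a (i-1) (j-1)) := by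
    split_ifs with h0 h1
    · simp
    · simp
    · rw [List.getD_eq_getElem?_getD, List.getElem?_replicate, if_pos (by omega)]; rfl
    · rfl
  rw [hup, hupl]
  simp only [pyGet2]
  ring

-- extensionality via getD for in-range indices
theorem listExtGetD {α : Type} (d : α) (L1 L2 : List α) (h : L1.length = L2.length)
    (he : ∀ j, j < L1.length → L1.getD j d = L2.getD j d) : L1 = L2 := by
  apply List.ext_getElem h
  intro j h1 h2
  have := he j h1
  rwa [List.getD_eq_getElem _ _ h1, List.getD_eq_getElem _ _ h2] at this

theorem main_eq (a : List (List Int)) (hrect : ∀ r ∈ a, r.length = (a.getD 0 []).length) :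
    findBeforeMatrices a = findBeforeMatrices_alt a := by
  obtain ⟨hlen, hrows, hent⟩ := sweep_good a hrect
  apply listExtGetD []
  · rw [hlen, findBeforeMatrices_alt, goRows_len]
  · intro i hiR
    have hi : i < a.length := by omega
    have hfb_len : ((findBeforeMatrices a).getD i []).length = (a.getD 0 []).length := by
      rw [hrows i hi]; exact rowlen a hrect hi
    have hprevlen : (if i = 0 then List.replicate (a.getD 0 []).length (0:Int) else a.getD (i-1) []).length
        = (a.getD 0 []).length := by
      split_ifs with h0
      · simp
      · exact rowlen a hrect (by omega)
    have halt_len : ((findBeforeMatrices_alt a).getD i []).length = (a.getD 0 []).length := by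
      rw [findBeforeMatrices_alt, goRows_getD a _ i hi, diffRow_len, hprevlen,
        rowlen a hrect hi]
      omega
    apply listExtGetD 0
    · rw [hfb_len, halt_len]
    · intro j hj
      have hjC : j < (a.getD 0 []).length := by rwa [hfb_len] at hj
      have h1 : pyGet2 (findBeforeMatrices a) i j = Dent a i j := by
        rw [hent i j hi hjC, if_pos (Or.inl hi)]
      have h2 := alt_entry a hrect hi hjC
      rw [pyGet2] at h1 h2
      rw [h1, h2]

-- ===== VERDICT (by name: the statement is the Claim_ definition above) =====
theorem findBeforeMatrices_spec : Claim_equal_findBeforeMatrices := by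
  intro a _ hpre
  unfold Spec_findBeforeMatrices
  exact main_eq a hpre.2
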